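-- pv_equiv track=rewrite | github.com/devosoft/Pepper | src/pepper/evaluator.py | convert_to_python
-- ===== SOURCE A (Python) =====
-- from typing import Union, List, cast
--
-- def convert_to_python(evaluation: List[str]) -> List[str]:
--     # catch AND && OR stuff
--     bool_count = evaluation.count("or") + evaluation.count("and")
--     if bool_count:
--         booleans = [(i, tok) for i, tok in enumerate(evaluation) if tok == "and" or tok == "or"]
--         new = ["bool("] * bool_count
--         start = 0
--         for n, curr in enumerate(booleans):
--             i, tok = curr
--             end = booleans[n + 1][0] if n + 1 < bool_count else len(evaluation)
--             right_arg = evaluation[i:end] + [")"]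
--             if n == 0:
--                 left_arg = evaluation[start:i]
--                 temp = left_arg[:] + right_arg[:]
--             else:
--                 temp = right_arg[:]
--
--             new.extend(temp)
--             start = i+1
--         evaluation = new
--
--     # catch ternary's
--     if '?' in evaluation:
--         question = evaluation.index('?')
--         expr = evaluation[:question]
--         colon = evaluation.index(':')
--         if_true = evaluation[question + 1:colon]
--         if_false = evaluation[colon+1:]
--         evaluation = if_true + ["if"] + expr + ["else"] + if_false
--
--     return evaluation
-- ===== SOURCE B (Python) =====
-- def convert_to_python(evaluation):
--     # boolean rewrite: one streaming pass instead of index list + segment slicing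
--     k = evaluation.count("or") + evaluation.count("and")
--     if k:
--         new = ["bool("] * k
--         seen = 0
--         for tok in evaluation:
--             if tok == "and" or tok == "or":
--                 if seen:
--                     new.append(")")
--                 seen += 1
--             new.append(tok)
--         new.append(")")
--         evaluation = new
--
--     # ternary rewrite (unchanged strategy)
--     if '?' in evaluation:
--         q = evaluation.index('?')
--         c = evaluation.index(':')
--         evaluation = evaluation[q + 1:c] + ["if"] + evaluation[:q] + ["else"] + evaluation[c + 1:]
--     return evaluation
-- ===== Notes on version B (the rewrite author's own statement) =====
-- stated objective: simpler
-- what changed: A builds an index list of boolean-operator positions and re-slices the token list segment by segment; B makes a single streaming pass over the tokens, emitting a ')' before every operator after the first and one trailing ')'; the ternary block is unchanged.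
import Mathlib
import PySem

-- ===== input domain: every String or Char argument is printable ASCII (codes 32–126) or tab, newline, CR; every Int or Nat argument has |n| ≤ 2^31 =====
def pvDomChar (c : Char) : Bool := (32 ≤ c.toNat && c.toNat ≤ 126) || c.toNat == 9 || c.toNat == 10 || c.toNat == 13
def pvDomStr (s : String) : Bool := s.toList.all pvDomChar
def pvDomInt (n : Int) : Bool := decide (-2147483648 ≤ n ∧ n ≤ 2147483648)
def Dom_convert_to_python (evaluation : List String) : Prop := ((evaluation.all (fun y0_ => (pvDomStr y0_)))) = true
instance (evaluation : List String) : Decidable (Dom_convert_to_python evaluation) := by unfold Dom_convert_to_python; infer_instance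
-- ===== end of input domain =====

-- B replaces A's boolean index-list + segment-slicing loop by a single streaming pass (objective: simpler); return-value equivalence only.

-- ===== PORT A =====
def convert_to_python (evaluation : List String) : List String :=
  let bool_count : Nat := PySem.List.count evaluation "or" + PySem.List.count evaluation "and"
  let evaluation1 : List String :=
    if bool_count ≠ 0 then
      let booleans : List (Int × String) :=
        (PySem.List.enumerate evaluation 0).filter (fun p => p.2 == "and" || p.2 == "or")
      ((PySem.List.enumerate booleans 0).foldl
        (fun (st : List String × Int) (nc : Int × Int × String) =>
          let n := nc.1
          let i := nc.2.1
          let end_ : Int := if n + 1 < (bool_count : Int) then (PySem.List.pyGetD booleans (n + 1) (0, "")).1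
                            else PySem.List.len evaluation
          let right_arg := PySem.List.slice evaluation (some i) (some end_) ++ [")"]
          let temp := if n == 0 then PySem.List.slice evaluation (some st.2) (some i) ++ right_arg
                      else right_arg
          (st.1 ++ temp, i + 1))
        (List.replicate bool_count "bool(", 0)).1
    else evaluation
  if "?" ∈ evaluation1 then
    match PySem.List.index? evaluation1 "?", PySem.List.index? evaluation1 ":" with
    | some question, some colon =>
      PySem.List.slice evaluation1 (some ((question : Int) + 1)) (some (colon : Int)) ++ ["if"] ++
      PySem.List.slice evaluation1 none (some (question : Int)) ++ ["else"] ++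
      PySem.List.slice evaluation1 (some ((colon : Int) + 1)) none
    | _, _ => evaluation1   -- Python raises ValueError here (':' absent); excluded by Pre_
  else evaluation1

-- ===== PORT B =====
def convert_to_python_alt (evaluation : List String) : List String :=
  let k : Nat := PySem.List.count evaluation "or" + PySem.List.count evaluation "and"
  let evaluation1 : List String :=
    if k ≠ 0 then
      (evaluation.foldl
        (fun (st : List String × Nat) tok =>
          if tok == "and" || tok == "or" then
            ((if st.2 ≠ 0 then st.1 ++ [")"] else st.1) ++ [tok], st.2 + 1)
          else (st.1 ++ [tok], st.2))
        (List.replicate k "bool(", 0)).1 ++ [")"]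
    else evaluation
  if "?" ∈ evaluation1 then
    match PySem.List.index? evaluation1 "?" with
    | some q =>
      match PySem.List.index? evaluation1 ":" with
      | some c =>
        PySem.List.slice evaluation1 (some ((q : Int) + 1)) (some (c : Int)) ++ ["if"] ++
        PySem.List.slice evaluation1 none (some (q : Int)) ++ ["else"] ++
        PySem.List.slice evaluation1 (some ((c : Int) + 1)) none
      | none => evaluation1   -- Python raises ValueError here (':' absent); excluded by Pre_
    | none => evaluation1
  else evaluation1

-- ===== PRECONDITION & SPEC =====
-- Pre_ excludes exactly the inputs where the Python raises ValueError: a '?' token with no ':' token.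
def Pre_convert_to_python (evaluation : List String) : Prop := "?" ∈ evaluation → ":" ∈ evaluation
instance (evaluation : List String) : Decidable (Pre_convert_to_python evaluation) := by unfold Pre_convert_to_python; infer_instance
def pvWitness_convert_to_python : List String := ["x", "and", "y", "or", "z"]

def Spec_convert_to_python (evaluation : List String) (out : List String) : Prop := out = convert_to_python_alt evaluation
instance (evaluation : List String) (out : List String) : Decidable (Spec_convert_to_python evaluation out) := by unfold Spec_convert_to_python; infer_instance

-- ===== CLAIM (what is proved, stated in full; the proofs are below) =====
def Claim_equal_convert_to_python : Prop := ∀ (evaluation : List String), Dom_convert_to_python evaluation → Pre_convert_to_python evaluation → Spec_convert_to_python evaluation (convert_to_python evaluation)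

-- ===== LEMMAS AND PROOFS =====


def isOp (t : String) : Bool := t == "and" || t == "or"
def g1 : List String → List String
  | [] => [")"]
  | t :: ts => if isOp t then ")" :: t :: g1 ts else t :: g1 ts
def g0 : List String → List String
  | [] => []
  | t :: ts => if isOp t then t :: g1 ts else g0 ts
def opsN : Nat → List String → List (Nat × String)
  | _, [] => []
  | off, t :: ts => if isOp t then (off, t) :: opsN (off + 1) ts else opsN (off + 1) ts
def cmap (B : List (Nat × String)) : List (Int × String) := B.map (fun q => ((q.1 : Int), q.2))

def stepA (evaluation : List String) (booleans : List (Int × String)) (bool_count : Nat) :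
    List String × Int → Int × Int × String → List String × Int := fun st nc =>
  let n := nc.1
  let i := nc.2.1
  let end_ : Int := if n + 1 < (bool_count : Int) then (PySem.List.pyGetD booleans (n + 1) (0, "")).1
                    else PySem.List.len evaluation
  let right_arg := PySem.List.slice evaluation (some i) (some end_) ++ [")"]
  let temp := if n == 0 then PySem.List.slice evaluation (some st.2) (some i) ++ right_arg
              else right_arg
  (st.1 ++ temp, i + 1)

lemma opsN_nil_opfree : ∀ (l : List String) (off : Nat), opsN off l = [] → ∀ x ∈ l, isOp x = false := by
  intro l
  induction l with
  | nil => simp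
  | cons t ts ih =>
    intro off h
    by_cases ht : isOp t
    · simp [opsN, ht] at h
    · simp only [opsN, ht, Bool.false_eq_true, if_false] at h
      simp only [Bool.not_eq_true] at ht
      intro x hx
      rcases List.mem_cons.1 hx with rfl | hx
      · exact ht
      · exact ih _ h x hx

lemma g1_append_opfree : ∀ (s l : List String), (∀ x ∈ s, isOp x = false) → g1 (s ++ l) = s ++ g1 l := by
  intro s
  induction s with
  | nil => simp
  | cons u us ih =>
    intro l h
    have hu : isOp u = false := h u (by simp)
    simp [g1, hu, ih l (fun x hx => h x (by simp [hx]))]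

lemma g1_opfree (s : List String) (h : ∀ x ∈ s, isOp x = false) : g1 s = s ++ [")"] := by
  simpa using g1_append_opfree s [] h

lemma g0_append_opfree : ∀ (s l : List String), (∀ x ∈ s, isOp x = false) → g0 (s ++ l) = g0 l := by
  intro s
  induction s with
  | nil => simp
  | cons u us ih =>
    intro l h
    have hu : isOp u = false := h u (by simp)
    simp [g0, hu, ih l (fun x hx => h x (by simp [hx]))]

lemma g0_opfree (s : List String) (h : ∀ x ∈ s, isOp x = false) : g0 s = [] := by
  simpa using g0_append_opfree s [] h

lemma opsN_cons_inv : ∀ (l : List String) (off p : Nat) (t : String) (L : List (Nat × String)),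
    opsN off l = (p, t) :: L →
    ∃ s r, l = s ++ t :: r ∧ (∀ x ∈ s, isOp x = false) ∧ isOp t = true ∧ p = off + s.length ∧
      opsN (p + 1) r = L := by
  intro l
  induction l with
  | nil => simp [opsN]
  | cons u us ih =>
    intro off p t L h
    by_cases hu : isOp u
    · simp only [opsN, hu, if_pos, List.cons.injEq, Prod.mk.injEq] at h
      obtain ⟨⟨rfl, rfl⟩, h2⟩ := h
      exact ⟨[], us, by simp, by simp, hu, by simp, by simpa using h2⟩
    · simp only [opsN, hu, Bool.false_eq_true, if_false] at h
      obtain ⟨s, r, rfl, hs, ht, hp, hL⟩ := ih (off + 1) p t L h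
      refine ⟨u :: s, r, rfl, ?_, ht, by simp [hp]; omega, hL⟩
      intro x hx
      rcases List.mem_cons.1 hx with rfl | hx
      · simpa using hu
      · exact hs x hx

lemma tailA (ev : List String) : ∀ (m : Nat) (rest : List String) (off j : Nat) (new : List String) (s0 : Int),
    rest.length ≤ m →
    ev.drop off = rest →
    opsN off rest = (opsN 0 ev).drop j →
    1 ≤ j →
    (List.foldl (stepA ev (cmap (opsN 0 ev)) (opsN 0 ev).length) (new, s0)
      (PySem.List.enumerate ((cmap (opsN 0 ev)).drop j) (j : Int))).1 = new ++ g0 rest := by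
  intro m
  induction m with
  | zero =>
    intro rest off j new s0 hm hdrop hops hj
    have hrest : rest = [] := List.eq_nil_of_length_eq_zero (Nat.le_zero.1 hm)
    subst hrest
    have h0 : (opsN 0 ev).drop j = [] := by rw [← hops]; rfl
    rw [cmap, ← List.map_drop, h0]
    simp [PySem.List.enumerate_nil, g0]
  | succ m ih =>
    intro rest off j new s0 hm hdrop hops hj
    rcases hL : (opsN 0 ev).drop j with _ | ⟨⟨p, t⟩, L'⟩
    · -- no remaining operators
      rw [hL] at hops
      rw [cmap, ← List.map_drop, hL]
      simp [PySem.List.enumerate_nil, g0_opfree rest (opsN_nil_opfree rest off hops)]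
    · rw [hL] at hops
      obtain ⟨s, r, hrest, hs, ht, hp, hr⟩ := opsN_cons_inv rest off p t L' hops
      have hjlt : j < (opsN 0 ev).length := by
        by_contra hc
        rw [List.drop_eq_nil_of_le (Nat.le_of_not_lt hc)] at hL
        exact (List.cons_ne_nil _ _) hL.symm
      have hdropsucc : (opsN 0 ev).drop (j + 1) = L' := by
        rw [← List.drop_drop, hL]
        rfl
      have hdropP : ev.drop p = t :: r := by
        have h1 : ev.drop p = List.drop s.length (List.drop off ev) := by
          rw [List.drop_drop, hp, Nat.add_comm]
        rw [h1, hdrop, hrest, List.drop_left]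
      have hcd : (cmap (opsN 0 ev)).drop j = (↑p, t) :: cmap L' := by
        rw [cmap, ← List.map_drop, hL]; rfl
      rw [hcd, PySem.List.enumerate_cons, List.foldl_cons]
      have hstep : stepA ev (cmap (opsN 0 ev)) (opsN 0 ev).length (new, s0) ((j : Int), ((p : Int), t)) =
          (new ++ (PySem.List.slice ev (some (p : Int))
            (some (if (j : Int) + 1 < ((opsN 0 ev).length : Int) then
              (PySem.List.pyGetD (cmap (opsN 0 ev)) ((j : Int) + 1) (0, "")).1 else PySem.List.len ev)) ++ [")"]),
            (p : Int) + 1) := by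
        have hne : ((j : Int) == 0) = false := by
          simp only [beq_eq_false_iff_ne, ne_eq, Int.natCast_eq_zero]
          omega
        simp [stepA, hne]
      rw [hstep]
      have hcast : ((j : Int) + 1) = ((j + 1 : Nat) : Int) := by push_cast; ring
      rcases hL' : L' with _ | ⟨⟨p2, t2⟩, L''⟩
      · -- last operator
        have hklast : ¬ ((j : Int) + 1 < ((opsN 0 ev).length : Int)) := by
          have : (opsN 0 ev).length ≤ j + 1 := by
            by_contra hc
            have := List.drop_eq_nil_iff.1 (by rw [hdropsucc, hL'] : (opsN 0 ev).drop (j+1) = [])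
            omega
          push_cast
          omega
        rw [if_neg hklast]
        have hlen : ev.length - p = r.length + 1 := by
          have := congrArg List.length hdropP
          simp at this
          omega
        have hslice : PySem.List.slice ev (some (p : Int)) (some (PySem.List.len ev)) = t :: r := by
          rw [PySem.List.len_eq, PySem.List.slice_natCast, hdropP]
          exact List.take_of_length_le (by simp [hlen])
        rw [hslice]
        simp only [cmap, List.map_nil, PySem.List.enumerate_nil, List.foldl_nil]
        rw [hL'] at hr
        rw [hrest, g0_append_opfree s _ hs]
        simp [g0, ht, g1_opfree r (opsN_nil_opfree r (p+1) hr)]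
      · -- more operators follow
        rw [hL'] at hdropsucc hr
        obtain ⟨s2, r2, hrr, hs2, ht2, hp2, hr2⟩ := opsN_cons_inv r (p + 1) p2 t2 L'' hr
        have hklt : ((j : Int) + 1 < ((opsN 0 ev).length : Int)) := by
          have : j + 1 < (opsN 0 ev).length := by
            by_contra hc
            rw [List.drop_eq_nil_of_le (Nat.le_of_not_lt (by omega))] at hdropsucc
            exact (List.cons_ne_nil _ _) hdropsucc.symm
          push_cast
          omega
        rw [if_pos hklt]
        have hget : (PySem.List.pyGetD (cmap (opsN 0 ev)) ((j : Int) + 1) (0, "")).1 = (p2 : Int) := by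
          rw [hcast, PySem.List.pyGetD_natCast]
          have : (cmap (opsN 0 ev))[j+1]? = some ((p2 : Int), t2) := by
            rw [cmap, List.getElem?_map]
            have : (opsN 0 ev)[j+1]? = some (p2, t2) := by
              have h0 : ((opsN 0 ev).drop (j+1))[0]? = some (p2, t2) := by rw [hdropsucc]; rfl
              rw [List.getElem?_drop] at h0
              simpa using h0
            rw [this]
            rfl
          rw [List.getD, this]
          rfl
        rw [hget]
        have hslice : PySem.List.slice ev (some (p : Int)) (some (p2 : Int)) = t :: s2 := by
          rw [PySem.List.slice_natCast, hdropP]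
          have : p2 - p = s2.length + 1 := by omega
          rw [this, List.take_succ_cons, hrr, List.take_left]
        rw [hslice]
        have harg1 : List.drop (p + 1) ev = r := by
          rw [← List.drop_drop, hdropP]
          rfl
        have hih := ih r (p + 1) (j + 1) (new ++ (t :: s2 ++ [")"])) ((p : Int) + 1)
          (by
            have : r.length < rest.length := by rw [hrest]; simp; omega
            omega)
          harg1
          (by rw [hdropsucc]; exact hr)
          (by omega)
        have hmd : List.drop (j + 1) (cmap (opsN 0 ev)) = cmap ((p2, t2) :: L'') := by
          unfold cmap
          rw [← List.map_drop, hdropsucc]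
        have henum : (PySem.List.enumerate (cmap ((p2, t2) :: L'')) ((j : Int) + 1)) =
            PySem.List.enumerate (List.drop (j + 1) (cmap (opsN 0 ev))) ((j + 1 : Nat) : Int) := by
          rw [hmd, hcast]
        rw [henum, hih, hrest, g0_append_opfree s _ hs]
        simp [g0, ht, hrr, g1_append_opfree s2 _ hs2, g0_append_opfree s2 _ hs2, g1, ht2]

def stepB : List String × Nat → String → List String × Nat := fun st tok =>
  if tok == "and" || tok == "or" then
    ((if st.2 ≠ 0 then st.1 ++ [")"] else st.1) ++ [tok], st.2 + 1)
  else (st.1 ++ [tok], st.2)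

lemma foldB_opfree : ∀ (s : List String) (new : List String), (∀ x ∈ s, isOp x = false) →
    List.foldl stepB (new, 0) s = (new ++ s, 0) := by
  intro s
  induction s with
  | nil => simp
  | cons u us ih =>
    intro new h
    have hu : (u == "and" || u == "or") = false := by simpa [isOp] using h u (by simp)
    simp [stepB, hu, ih (new ++ [u]) (fun x hx => h x (by simp [hx]))]

lemma foldB_g1 : ∀ (l : List String) (new : List String) (c : Nat), c ≠ 0 →
    (List.foldl stepB (new, c) l).1 ++ [")"] = new ++ g1 l := by
  intro l
  induction l with
  | nil => simp [g1]
  | cons u us ih =>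
    intro new c hc
    by_cases hu : isOp u
    · have hb : (u == "and" || u == "or") = true := by simpa [isOp] using hu
      simp only [List.foldl_cons, stepB, hb, if_pos, hc, ne_eq, not_false_iff, if_true, g1, hu]
      rw [ih _ (c + 1) (by omega)]
      simp
    · have hb : (u == "and" || u == "or") = false := by simpa [isOp] using hu
      simp only [List.foldl_cons, stepB, hb, Bool.false_eq_true, if_false, g1, hu]
      rw [ih _ c hc]
      simp

lemma bool_core (ev : List String) (p0 : Nat) (t0 : String) (L' : List (Nat × String))
    (hB : opsN 0 ev = (p0, t0) :: L') :
    (List.foldl (stepA ev (cmap (opsN 0 ev)) (opsN 0 ev).length)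
        (List.replicate (opsN 0 ev).length "bool(", 0)
        (PySem.List.enumerate (cmap (opsN 0 ev)) 0)).1 =
    (List.foldl stepB (List.replicate (opsN 0 ev).length "bool(", 0) ev).1 ++ [")"] := by
  obtain ⟨s, r, hrest, hs, ht, hp, hr⟩ := opsN_cons_inv ev 0 p0 t0 L' hB
  have hbt : (t0 == "and" || t0 == "or") = true := by simpa [isOp] using ht
  -- B side
  have hBside : (List.foldl stepB (List.replicate (opsN 0 ev).length "bool(", 0) ev).1 ++ [")"] =
      List.replicate (opsN 0 ev).length "bool(" ++ s ++ [t0] ++ g1 r := by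
    rw [hrest, List.foldl_append, foldB_opfree s _ hs]
    simp only [List.foldl_cons, stepB, hbt, if_pos]
    rw [foldB_g1 r _ 1 (by omega)]
    simp
  rw [hBside]
  -- A side
  have hdropP : ev.drop p0 = t0 :: r := by
    rw [hp, Nat.zero_add, hrest, List.drop_left]
  have hcd : PySem.List.enumerate (cmap (opsN 0 ev)) 0 =
      ((0 : Int), ((p0 : Int), t0)) :: PySem.List.enumerate (cmap L') (0 + 1) := by
    have : cmap (opsN 0 ev) = ((p0 : Int), t0) :: cmap L' := by rw [hB]; rfl
    rw [this, PySem.List.enumerate_cons]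
  rw [hcd, List.foldl_cons]
  have htake : PySem.List.slice ev (some (0 : Int)) (some ((p0 : Int))) = s := by
    rw [PySem.List.slice_zero_start, PySem.List.slice_to_natCast, hrest, hp, Nat.zero_add,
      List.take_left]
  have hstep0 : stepA ev (cmap (opsN 0 ev)) (opsN 0 ev).length
      (List.replicate (opsN 0 ev).length "bool(", 0) ((0 : Int), ((p0 : Int), t0)) =
      (List.replicate (opsN 0 ev).length "bool(" ++ (s ++ (PySem.List.slice ev (some (p0 : Int))
        (some (if (0 : Int) + 1 < ((opsN 0 ev).length : Int) then
          (PySem.List.pyGetD (cmap (opsN 0 ev)) ((0 : Int) + 1) (0, "")).1 else PySem.List.len ev)) ++ [")"])),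
        (p0 : Int) + 1) := by
    simp [stepA, htake]
  rw [hstep0]
  rcases hL' : L' with _ | ⟨⟨p2, t2⟩, L''⟩
  · subst hL'
    have hk : (opsN 0 ev).length = 1 := by rw [hB]; rfl
    have hkc : ¬ ((0 : Int) + 1 < ((opsN 0 ev).length : Int)) := by rw [hk]; norm_num
    rw [if_neg hkc]
    have hlen : ev.length - p0 = r.length + 1 := by
      have := congrArg List.length hdropP
      simp at this
      omega
    have hslice : PySem.List.slice ev (some (p0 : Int)) (some (PySem.List.len ev)) = t0 :: r := by
      rw [PySem.List.len_eq, PySem.List.slice_natCast, hdropP]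
      exact List.take_of_length_le (by simp [hlen])
    rw [hslice]
    simp only [cmap, List.map_nil, PySem.List.enumerate_nil, List.foldl_nil]
    rw [g1_opfree r (opsN_nil_opfree r (p0 + 1) hr)]
    simp
  · subst hL'
    obtain ⟨s2, r2, hrr, hs2, ht2, hp2, hr2⟩ := opsN_cons_inv r (p0 + 1) p2 t2 L'' hr
    have hk2 : 1 < (opsN 0 ev).length := by rw [hB]; simp
    have hkc : ((0 : Int) + 1 < ((opsN 0 ev).length : Int)) := by push_cast; omega
    rw [if_pos hkc]
    have hget : (PySem.List.pyGetD (cmap (opsN 0 ev)) ((0 : Int) + 1) (0, "")).1 = (p2 : Int) := by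
      have h1 : ((0 : Int) + 1) = ((1 : Nat) : Int) := by norm_num
      rw [h1, PySem.List.pyGetD_natCast]
      rw [hB]
      rfl
    rw [hget]
    have hslice : PySem.List.slice ev (some (p0 : Int)) (some (p2 : Int)) = t0 :: s2 := by
      rw [PySem.List.slice_natCast, hdropP]
      have : p2 - p0 = s2.length + 1 := by omega
      rw [this, List.take_succ_cons, hrr, List.take_left]
    rw [hslice]
    have hdrop1 : List.drop 1 (opsN 0 ev) = (p2, t2) :: L'' := by rw [hB]; rfl
    have hmd : PySem.List.enumerate (cmap ((p2, t2) :: L'')) ((0 : Int) + 1) =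
        PySem.List.enumerate (List.drop 1 (cmap (opsN 0 ev))) ((1 : Nat) : Int) := by
      have : List.drop 1 (cmap (opsN 0 ev)) = cmap ((p2, t2) :: L'') := by
        unfold cmap
        rw [← List.map_drop, hdrop1]
      rw [this]
      norm_num
    rw [hmd]
    have harg1 : List.drop (p0 + 1) ev = r := by
      rw [← List.drop_drop, hdropP]
      rfl
    rw [tailA ev r.length r (p0 + 1) 1 _ ((p0 : Int) + 1) le_rfl harg1 (by rw [hdrop1]; exact hr) le_rfl]
    simp [hrr, g1_append_opfree s2 _ hs2, g0_append_opfree s2 _ hs2, g1, g0, ht2]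


lemma filter_enumerate : ∀ (l : List String) (off : Nat),
    (PySem.List.enumerate l (off : Int)).filter (fun p => p.2 == "and" || p.2 == "or") = cmap (opsN off l) := by
  intro l
  induction l with
  | nil => simp [cmap, opsN]
  | cons t ts ih =>
    intro off
    have hc : ((off : Int) + 1) = ((off + 1 : Nat) : Int) := by push_cast; ring
    rw [PySem.List.enumerate_cons, List.filter_cons, hc, ih (off + 1)]
    by_cases ht : isOp t
    · have : (t == "and" || t == "or") = true := by simpa [isOp] using ht
      simp only [this, if_pos, opsN, ht, cmap, List.map_cons]
    · have : (t == "and" || t == "or") = false := by simpa [isOp] using ht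
      simp only [this, opsN, ht, Bool.false_eq_true, if_false]

lemma count_bridge : ∀ (l : List String) (off : Nat),
    PySem.List.count l "or" + PySem.List.count l "and" = (opsN off l).length := by
  intro l
  induction l with
  | nil => simp [PySem.List.count_eq, opsN]
  | cons t ts ih =>
    intro off
    simp only [PySem.List.count_eq, List.count_cons] at *
    by_cases ht : isOp t
    · have : t = "and" ∨ t = "or" := by simpa [isOp] using ht
      rcases this with rfl | rfl <;> simp [opsN, isOp, ← ih (off + 1)] <;> omega
    · have h1 : t ≠ "and" := by rintro rfl; simp [isOp] at ht
      have h2 : t ≠ "or" := by rintro rfl; simp [isOp] at ht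
      have hb : (t == "and") = false := by simp [h1]
      have hb2 : (t == "or") = false := by simp [h2]
      simp [hb, hb2, h1, h2, opsN, ht, ← ih (off + 1)]

def ternaryStep (evaluation1 : List String) : List String :=
  if "?" ∈ evaluation1 then
    match PySem.List.index? evaluation1 "?", PySem.List.index? evaluation1 ":" with
    | some q, some c =>
      PySem.List.slice evaluation1 (some ((q : Int) + 1)) (some (c : Int)) ++ ["if"] ++
      PySem.List.slice evaluation1 none (some (q : Int)) ++ ["else"] ++
      PySem.List.slice evaluation1 (some ((c : Int) + 1)) none
    | _, _ => evaluation1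
  else evaluation1

def boolA (evaluation : List String) : List String :=
  let bool_count : Nat := PySem.List.count evaluation "or" + PySem.List.count evaluation "and"
  if bool_count ≠ 0 then
    let booleans := (PySem.List.enumerate evaluation 0).filter (fun p => p.2 == "and" || p.2 == "or")
    ((PySem.List.enumerate booleans 0).foldl (stepA evaluation booleans bool_count)
      (List.replicate bool_count "bool(", 0)).1
  else evaluation

def boolB (evaluation : List String) : List String :=
  let k : Nat := PySem.List.count evaluation "or" + PySem.List.count evaluation "and"
  if k ≠ 0 then
    (evaluation.foldl stepB (List.replicate k "bool(", 0)).1 ++ [")"]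
  else evaluation

def ternaryStepB (evaluation1 : List String) : List String :=
  if "?" ∈ evaluation1 then
    match PySem.List.index? evaluation1 "?" with
    | some q =>
      match PySem.List.index? evaluation1 ":" with
      | some c =>
        PySem.List.slice evaluation1 (some ((q : Int) + 1)) (some (c : Int)) ++ ["if"] ++
        PySem.List.slice evaluation1 none (some (q : Int)) ++ ["else"] ++
        PySem.List.slice evaluation1 (some ((c : Int) + 1)) none
      | none => evaluation1
    | none => evaluation1
  else evaluation1

lemma portA_split (ev : List String) : convert_to_python ev = ternaryStep (boolA ev) := rfl

lemma portB_split (ev : List String) : convert_to_python_alt ev = ternaryStepB (boolB ev) := rfl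

lemma ternary_eq (l : List String) : ternaryStep l = ternaryStepB l := by
  unfold ternaryStep ternaryStepB
  rcases PySem.List.index? l "?" with _ | q <;> rcases PySem.List.index? l ":" with _ | c <;> rfl

lemma count_bridge0 (l : List String) :
    PySem.List.count l "or" + PySem.List.count l "and" = (opsN 0 l).length := count_bridge l 0

lemma filter_enumerate0 (l : List String) :
    (PySem.List.enumerate l 0).filter (fun p => p.2 == "and" || p.2 == "or") = cmap (opsN 0 l) := by
  have h := filter_enumerate l 0
  rw [Nat.cast_zero] at h
  exact h

lemma bool_eq (ev : List String) : boolA ev = boolB ev := by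
  unfold boolA boolB
  rw [count_bridge0, filter_enumerate0]
  by_cases h : (opsN 0 ev).length ≠ 0
  · rw [if_pos h, if_pos h]
    rcases hB : opsN 0 ev with _ | ⟨⟨p0, t0⟩, L'⟩
    · rw [hB] at h; simp at h
    · rw [← hB]
      exact bool_core ev p0 t0 L' hB
  · rw [if_neg h, if_neg h]

-- ===== VERDICT (by name: the statement is the Claim_ definition above) =====
theorem convert_to_python_spec : Claim_equal_convert_to_python := by
  intro ev _ _
  unfold Spec_convert_to_python
  rw [portA_split, portB_split, bool_eq, ternary_eq]
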